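-- pv_equiv track=rewrite | github.com/pjdrm/BeamSeg | src/scripts/ref_hyp_plot.py | convert_zero_one_seg
-- ===== SOURCE A (Python) =====
-- def convert_zero_one_seg(seg):
--     ret_seg = []
--     prev_topic = seg[0]
--     for t in seg:
--         if t != prev_topic:
--             ret_seg[-1] = 1
--         ret_seg.append(0)
--         prev_topic = t
--     return ret_seg
-- ===== SOURCE B (Python) =====
-- def convert_zero_one_seg(seg):
--     # stage 1: run-length encode the topic sequence
--     runs = []
--     cnt = 0
--     last = None
--     for t in seg:
--         if cnt > 0 and t == last:
--             cnt += 1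
--         else:
--             if cnt > 0:
--                 runs.append(cnt)
--             cnt = 1
--         last = t
--     if cnt > 0:
--         runs.append(cnt)
--     # stage 2: a non-final run of length L contributes L-1 zeros and a boundary 1;
--     # the final run ends the sequence, so it contributes L zeros.
--     out = []
--     for L in runs[:-1]:
--         out += [0] * (L - 1) + [1]
--     if runs:
--         out += [0] * runs[-1]
--     return out
-- ===== Notes on version B (the rewrite author's own statement) =====
-- stated objective: alternative
-- what changed: Replaces A's single-pass append-then-retroactively-mutate loop with a two-stage run-length decomposition: first run-length-encode the topic sequence, then expand each non-final run of length L into L-1 zeros plus a boundary 1 and the final run into L zeros.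
import Mathlib
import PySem

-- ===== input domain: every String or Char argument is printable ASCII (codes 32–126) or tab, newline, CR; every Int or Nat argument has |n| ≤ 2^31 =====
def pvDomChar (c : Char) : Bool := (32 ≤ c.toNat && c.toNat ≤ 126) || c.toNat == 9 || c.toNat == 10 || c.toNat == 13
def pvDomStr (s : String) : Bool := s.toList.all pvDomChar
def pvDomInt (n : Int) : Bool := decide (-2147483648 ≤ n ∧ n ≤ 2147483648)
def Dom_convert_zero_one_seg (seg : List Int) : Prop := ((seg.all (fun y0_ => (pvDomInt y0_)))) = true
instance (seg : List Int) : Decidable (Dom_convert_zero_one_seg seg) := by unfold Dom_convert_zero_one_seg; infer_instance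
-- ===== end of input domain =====

-- B replaces A's append-then-retroactively-mutate-the-last-cell loop with a two-stage
-- run-length decomposition (encode runs, then expand them into boundary blocks); same O(n) cost.

-- ===== PORT A =====
-- A: ret_seg = []; prev = seg[0]; for t in seg: if t != prev: set last cell to 1; append 0; prev = t
def convert_zero_one_seg (seg : List Int) : List Int :=
  match PySem.List.pyGet? seg 0 with
  | none => []   -- seg[0] raises IndexError here in Python; excluded by Pre_
  | some p0 =>
    (seg.foldl (fun st t =>
        ((if t ≠ st.2 then st.1.dropLast ++ [1] else st.1) ++ [0], t))
      ([], p0)).1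

-- ===== PORT B =====
-- B stage 1: for t in seg: if cnt > 0 and t == last: cnt += 1 else: (if cnt > 0: runs.append(cnt)); cnt = 1; last = t
--            then if cnt > 0: runs.append(cnt)
-- B stage 2: for L in runs[:-1]: out += [0]*(L-1) + [1]; then if runs: out += [0]*runs[-1]
def convert_zero_one_seg_alt (seg : List Int) : List Int :=
  let st := seg.foldl
    (fun (st : List Int × Int × Option Int) t =>
      if 0 < st.2.1 ∧ some t = st.2.2 then (st.1, st.2.1 + 1, some t)
      else ((if 0 < st.2.1 then st.1 ++ [st.2.1] else st.1), 1, some t))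
    ([], 0, none)
  let runs := if 0 < st.2.1 then st.1 ++ [st.2.1] else st.1
  let out := runs.dropLast.foldl
    (fun out L => out ++ List.replicate (L - 1).toNat (0 : Int) ++ [1]) []
  out ++ (match runs.getLast? with
          | some L => List.replicate L.toNat (0 : Int)
          | none => [])

-- ===== PRECONDITION & SPEC =====
-- Pre_ excludes only the empty list, on which A raises IndexError (seg[0]).
def Pre_convert_zero_one_seg (seg : List Int) : Prop := seg ≠ []
instance (seg : List Int) : Decidable (Pre_convert_zero_one_seg seg) := by unfold Pre_convert_zero_one_seg; infer_instance
def pvWitness_convert_zero_one_seg : List Int := [1, 1, 2]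

def Spec_convert_zero_one_seg (seg : List Int) (out : List Int) : Prop := out = convert_zero_one_seg_alt seg
instance (seg : List Int) (out : List Int) : Decidable (Spec_convert_zero_one_seg seg out) := by unfold Spec_convert_zero_one_seg; infer_instance

-- ===== CLAIM (what is proved, stated in full; the proofs are below) =====
def Claim_equal_convert_zero_one_seg : Prop := ∀ (seg : List Int), Dom_convert_zero_one_seg seg → Pre_convert_zero_one_seg seg → Spec_convert_zero_one_seg seg (convert_zero_one_seg seg)

-- ===== LEMMAS AND PROOFS =====

-- The common value: boundary markers between consecutive topics, trailing 0.
def pvMark (prev : Int) : List Int → List Int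
  | [] => [0]
  | t :: l => (if t = prev then 0 else 1) :: pvMark t l

lemma pvLoopA (l : List Int) (acc : List Int) (prev : Int) :
    (l.foldl (fun st t =>
        ((if t ≠ st.2 then st.1.dropLast ++ [1] else st.1) ++ [0], t))
      (acc ++ [0], prev)).1 = acc ++ pvMark prev l := by
  induction l generalizing acc prev with
  | nil => simp [pvMark]
  | cons t l ih =>
    simp only [List.foldl_cons]
    by_cases h : t = prev
    · have hnn : ¬ (t ≠ prev) := not_not_intro h
      rw [if_neg hnn, ih (acc ++ [0]) t]
      simp [pvMark, h]
    · have hd : (acc ++ [0] : List Int).dropLast = acc := by simp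
      rw [if_pos h, hd, ih (acc ++ [1]) t]
      simp [pvMark, h]

-- run lengths of prev^cnt followed by l
def pvRunsF (prev cnt : Int) : List Int → List Int
  | [] => [cnt]
  | t :: l => if t = prev then pvRunsF prev (cnt + 1) l else cnt :: pvRunsF t 1 l

lemma pvRunsF_ne_nil (l : List Int) (prev cnt : Int) : pvRunsF prev cnt l ≠ [] := by
  induction l generalizing prev cnt with
  | nil => simp [pvRunsF]
  | cons t l ih =>
    simp only [pvRunsF]
    split <;> simp [ih]

-- the expansion of a run-length list into boundary markers
def pvExpand : List Int → List Int
  | [] => []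
  | [L] => List.replicate L.toNat 0
  | L :: R :: Rs => List.replicate (L - 1).toNat 0 ++ 1 :: pvExpand (R :: Rs)

-- named copies of port B's loop body and run finalization (definitionally equal to the inline ones)
def pvStep (st : List Int × Int × Option Int) (t : Int) : List Int × Int × Option Int :=
  if 0 < st.2.1 ∧ some t = st.2.2 then (st.1, st.2.1 + 1, some t)
  else ((if 0 < st.2.1 then st.1 ++ [st.2.1] else st.1), 1, some t)

def pvFin (st : List Int × Int × Option Int) : List Int :=
  if 0 < st.2.1 then st.1 ++ [st.2.1] else st.1

lemma portB_eq (seg : List Int) :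
    convert_zero_one_seg_alt seg =
      (pvFin (seg.foldl pvStep ([], 0, none))).dropLast.foldl
        (fun out L => out ++ List.replicate (L - 1).toNat 0 ++ [1]) []
      ++ (match (pvFin (seg.foldl pvStep ([], 0, none))).getLast? with
          | some L => List.replicate L.toNat (0 : Int)
          | none => []) := rfl

-- stage-1 invariant
lemma pvStage1 (l : List Int) (runs : List Int) (cnt prev : Int) (hc : 0 < cnt) :
    pvFin (l.foldl pvStep (runs, cnt, some prev)) = runs ++ pvRunsF prev cnt l := by
  induction l generalizing runs cnt prev with
  | nil => simp [pvFin, pvRunsF, hc]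
  | cons t l ih =>
    simp only [List.foldl_cons]
    by_cases h : t = prev
    · subst h
      rw [show pvStep (runs, cnt, some t) t = (runs, cnt + 1, some t) by
            simp [pvStep, hc]]
      rw [ih runs (cnt + 1) t (by omega)]
      simp [pvRunsF]
    · rw [show pvStep (runs, cnt, some prev) t = (runs ++ [cnt], 1, some t) by
            simp [pvStep, h, hc]]
      rw [ih (runs ++ [cnt]) 1 t (by omega)]
      simp [pvRunsF, h]

-- stage-2: the fold over runs[:-1] plus the final block equals pvExpand
lemma pvStage2 (R : List Int) (acc : List Int) :
    (R.dropLast.foldl (fun out L => out ++ List.replicate (L - 1).toNat 0 ++ [1]) acc)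
      ++ (match R.getLast? with
          | some L => List.replicate L.toNat (0 : Int)
          | none => []) = acc ++ pvExpand R := by
  induction R generalizing acc with
  | nil => simp [pvExpand]
  | cons L R ih =>
    cases R with
    | nil => simp [pvExpand]
    | cons M Rs =>
      rw [show (L :: M :: Rs).dropLast = L :: (M :: Rs).dropLast from rfl]
      simp only [List.foldl_cons, List.getLast?_cons_cons]
      rw [ih (acc ++ List.replicate (L - 1).toNat 0 ++ [1])]
      simp [pvExpand]

-- expanding the run lengths gives the boundary markers
lemma pvRE (l : List Int) (prev cnt : Int) (hc : 0 < cnt) :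
    pvExpand (pvRunsF prev cnt l)
      = List.replicate (cnt - 1).toNat 0 ++ pvMark prev l := by
  induction l generalizing prev cnt with
  | nil =>
    simp only [pvRunsF, pvExpand, pvMark]
    rw [show cnt.toNat = (cnt - 1).toNat + 1 by omega, List.replicate_succ']
  | cons t l ih =>
    simp only [pvRunsF, pvMark]
    by_cases h : t = prev
    · subst h
      rw [if_pos rfl, if_pos rfl, ih t (cnt + 1) (by omega),
          show (cnt + 1 - 1 : Int) = cnt from by ring,
          show cnt.toNat = (cnt - 1).toNat + 1 by omega, List.replicate_succ']
      simp
    · rw [if_neg h, if_neg h]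
      obtain ⟨M, Rs, hMR⟩ : ∃ M Rs, pvRunsF t 1 l = M :: Rs := by
        cases hR : pvRunsF t 1 l with
        | nil => exact absurd hR (pvRunsF_ne_nil l t 1)
        | cons M Rs => exact ⟨M, Rs, rfl⟩
      rw [hMR]
      show List.replicate (cnt - 1).toNat 0 ++ 1 :: pvExpand (M :: Rs) = _
      rw [← hMR, ih t 1 (by omega)]
      simp

-- ===== VERDICT (by name: the statement is the Claim_ definition above) =====
theorem convert_zero_one_seg_spec : Claim_equal_convert_zero_one_seg := by
  intro seg _ hpre
  match seg, hpre with
  | a :: rest, _ =>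
    show convert_zero_one_seg (a :: rest) = convert_zero_one_seg_alt (a :: rest)
    have hA : convert_zero_one_seg (a :: rest) = pvMark a rest := by
      simp only [convert_zero_one_seg, PySem.List.pyGet?, PySem.List.pyIdx?]
      simpa using pvLoopA rest [] a
    have hruns : pvFin ((a :: rest).foldl pvStep ([], 0, none)) = pvRunsF a 1 rest := by
      rw [List.foldl_cons,
          show pvStep ([], 0, none) a = ([], 1, some a) from by simp [pvStep]]
      simpa using pvStage1 rest [] 1 a (by omega)
    have hB : convert_zero_one_seg_alt (a :: rest) = pvMark a rest := by
      rw [portB_eq, hruns, pvStage2 (pvRunsF a 1 rest) [], pvRE rest a 1 (by omega)]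
      simp
    rw [hA, hB]
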